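-- pv_equiv track=rewrite | github.com/punt-labs/quarry | src/quarry/spreadsheet_processor.py | _split_rows_to_sections
-- ===== SOURCE A (Python) =====
-- _LATEX_SPECIAL = str.maketrans(
--     {
--         "&": r"\&",
--         "%": r"\%",
--         "$": r"\$",
--         "#": r"\#",
--         "_": r"\_",
--         "{": r"\{",
--         "}": r"\}",
--         "~": r"\textasciitilde{}",
--         "^": r"\textasciicircum{}",
--         "\\": r"\textbackslash{}",
--     }
-- )
--
-- def _escape_latex(text: str) -> str:
--     """Escape LaTeX special characters in a cell value."""
--     return text.translate(_LATEX_SPECIAL)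
--
-- def _rows_to_latex(
--     headers: list[str],
--     rows: list[list[str]],
--     sheet_name: str | None = None,
-- ) -> str:
--     """Render headers + data rows as a LaTeX tabular block.
--
--     Returns an empty string when *headers* is empty.
--     """
--     if not headers:
--         return ""
--
--     ncols = len(headers)
--     col_spec = "l" * ncols
--
--     lines: list[str] = []
--     if sheet_name:
--         lines.append(f"% Sheet: {sheet_name}")
--     lines.append(f"\\begin{{tabular}}{{{col_spec}}}")
--     lines.append("\\hline")
--     lines.append(" & ".join(_escape_latex(h) for h in headers) + " \\\\")
--     lines.append("\\hline")
--
--     for row in rows: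
--         padded = row[:ncols] + [""] * max(0, ncols - len(row))
--         lines.append(" & ".join(_escape_latex(c) for c in padded) + " \\\\")
--
--     lines.append("\\hline")
--     lines.append("\\end{tabular}")
--
--     return "\n".join(lines)
--
-- def _split_rows_to_sections(
--     headers: list[str],
--     rows: list[list[str]],
--     sheet_name: str | None,
--     max_chars: int,
-- ) -> list[str]:
--     """Split a large table into row-group sections with repeated headers.
--
--     If the full table fits within *max_chars*, returns a single section.
--     Otherwise, rows are grouped so each section stays under the limit.
--     """
--     full = _rows_to_latex(headers, rows, sheet_name)
--     if len(full) <= max_chars or len(rows) <= 1: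
--         return [full] if full.strip() else []
--
--     sections: list[str] = []
--     current_rows: list[list[str]] = []
--
--     for row in rows:
--         candidate = [*current_rows, row]
--         block = _rows_to_latex(headers, candidate, sheet_name)
--         if len(block) > max_chars and current_rows:
--             sections.append(_rows_to_latex(headers, current_rows, sheet_name))
--             current_rows = [row]
--         else:
--             current_rows.append(row)
--
--     if current_rows:
--         sections.append(_rows_to_latex(headers, current_rows, sheet_name))
--
--     return sections
-- ===== SOURCE B (Python) =====
-- _LATEX_SPECIAL = str.maketrans(
--     {
--         "&": r"\&",
--         "%": r"\%",
--         "$": r"\$",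
--         "#": r"\#",
--         "_": r"\_",
--         "{": r"\{",
--         "}": r"\}",
--         "~": r"\textasciitilde{}",
--         "^": r"\textasciicircum{}",
--         "\\": r"\textbackslash{}",
--     }
-- )
--
--
-- def _escape_latex(text: str) -> str:
--     return text.translate(_LATEX_SPECIAL)
--
--
-- def _split_rows_to_sections(
--     headers: list[str],
--     rows: list[list[str]],
--     sheet_name: str | None,
--     max_chars: int,
-- ) -> list[str]:
--     """One-pass splitter: render each row line once, track the running
--     block length incrementally, and join each section a single time."""
--     if not headers:
--         return []
--
--     ncols = len(headers)
--     pre = []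
--     if sheet_name:
--         pre.append(f"% Sheet: {sheet_name}")
--     pre.append("\\begin{tabular}{" + "l" * ncols + "}")
--     pre.append("\\hline")
--     pre.append(" & ".join(_escape_latex(h) for h in headers) + " \\\\")
--     pre.append("\\hline")
--     suf = ["\\hline", "\\end{tabular}"]
--
--     row_lines = [
--         " & ".join(
--             _escape_latex(c)
--             for c in row[:ncols] + [""] * max(0, ncols - len(row))
--         )
--         + " \\\\"
--         for row in rows
--     ]
--
--     # joined length of a block with these row lines = base + sum(len(l)+1)
--     base = sum(len(l) + 1 for l in pre + suf) - 1
--     total = base + sum(len(l) + 1 for l in row_lines)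
--     if total <= max_chars or len(rows) <= 1:
--         return ["\n".join(pre + row_lines + suf)]
--
--     groups: list[list[str]] = []
--     cur: list[str] = []
--     cur_len = 0
--     for line in row_lines:
--         c = len(line) + 1
--         if base + cur_len + c > max_chars and cur:
--             groups.append(cur)
--             cur, cur_len = [line], c
--         else:
--             cur.append(line)
--             cur_len += c
--     groups.append(cur)
--
--     return ["\n".join(pre + g + suf) for g in groups]
-- ===== Notes on version B (the rewrite author's own statement) =====
-- stated objective: faster
-- what changed: B renders each row line exactly once and tracks the running block length incrementally (base length + per-line costs) to decide splits in one pass, joining each section a single time, instead of re-rendering the entire candidate LaTeX block for every row as A does.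
-- intended difference: When headers is empty, max_chars is negative and there are at least two rows, A returns one empty string per row (splitting an entirely empty table into empty sections), while B returns [], the intended 'no sections for an empty table' answer that A itself gives everywhere else headers is empty. — e.g. on _split_rows_to_sections([], [[], []], none, -1): A returns ["", ""], B returns []
import Mathlib
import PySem

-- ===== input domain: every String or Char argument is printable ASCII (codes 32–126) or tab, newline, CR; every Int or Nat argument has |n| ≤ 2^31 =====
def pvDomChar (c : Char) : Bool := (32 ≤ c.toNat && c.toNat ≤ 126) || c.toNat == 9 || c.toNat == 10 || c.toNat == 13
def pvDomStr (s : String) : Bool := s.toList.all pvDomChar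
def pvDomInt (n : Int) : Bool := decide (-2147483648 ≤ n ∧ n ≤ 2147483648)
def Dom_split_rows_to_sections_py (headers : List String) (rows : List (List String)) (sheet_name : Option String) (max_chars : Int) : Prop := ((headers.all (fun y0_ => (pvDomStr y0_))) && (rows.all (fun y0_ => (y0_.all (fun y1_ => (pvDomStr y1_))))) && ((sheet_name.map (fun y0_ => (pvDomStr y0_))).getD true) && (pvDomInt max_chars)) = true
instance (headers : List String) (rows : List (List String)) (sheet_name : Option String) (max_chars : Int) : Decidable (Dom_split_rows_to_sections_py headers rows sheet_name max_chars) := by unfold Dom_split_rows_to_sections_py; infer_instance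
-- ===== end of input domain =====

-- B renders each row line once and tracks the running block length incrementally
-- (one pass, one join per section) instead of re-rendering the whole candidate
-- block for every row; measurably faster on large tables.


-- ===== PORT A =====

-- str.translate(_LATEX_SPECIAL): per-character replacement (exact on the domain)
def pvEscChar (c : Char) : List Char :=
  if c = '&' then "\\&".toList
  else if c = '%' then "\\%".toList
  else if c = '$' then "\\$".toList
  else if c = '#' then "\\#".toList
  else if c = '_' then "\\_".toList
  else if c = '{' then "\\{".toList
  else if c = '}' then "\\}".toList
  else if c = '~' then "\\textasciitilde{}".toList
  else if c = '^' then "\\textasciicircum{}".toList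
  else if c = '\\' then "\\textbackslash{}".toList
  else [c]

-- _escape_latex (on the char-list side)
def pvEsc (cs : List Char) : List Char := cs.flatMap pvEscChar

-- the rendered line of one data row (identical expression in Source A and Source B)
def pvRowLine (ncols : Nat) (row : List String) : List Char :=
  let padded := PySem.List.slice row none (some (ncols : Int)) ++
    List.replicate (max 0 ((ncols : Int) - row.length)).toNat ""
  PySem.Chars.join " & ".toList (padded.map (fun c => pvEsc c.toList)) ++ " \\\\".toList

-- _rows_to_latex, transliterated (lines built front to back, then joined)
def pvRowsToLatex (headers : List String) (rows : List (List String)) (sheet_name : Option String) : List Char :=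
  if headers = [] then [] else
    let ncols := headers.length
    let colSpec := List.replicate ncols 'l'
    let lines0 : List (List Char) := match sheet_name with
      | some s => if s = "" then [] else ["% Sheet: ".toList ++ s.toList]
      | none => []
    let lines1 := lines0 ++ ["\\begin{tabular}{".toList ++ colSpec ++ "}".toList]
    let lines2 := lines1 ++ ["\\hline".toList]
    let lines3 := lines2 ++
      [PySem.Chars.join " & ".toList (headers.map (fun h => pvEsc h.toList)) ++ " \\\\".toList]
    let lines4 := lines3 ++ ["\\hline".toList]
    let lines5 := lines4 ++ rows.map (pvRowLine ncols)
    let lines6 := lines5 ++ ["\\hline".toList, "\\end{tabular}".toList]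
    PySem.Chars.join ['\n'] lines6

def split_rows_to_sections_py (headers : List String) (rows : List (List String)) (sheet_name : Option String) (max_chars : Int) : List String :=
  let full := pvRowsToLatex headers rows sheet_name
  if ((full.length : Int) ≤ max_chars ∨ rows.length ≤ 1) then
    (if PySem.Chars.strip full ≠ [] then [String.ofList full] else [])
  else
    let st := rows.foldl (fun (st : List String × List (List String)) row =>
      let cand := st.2 ++ [row]
      let block := pvRowsToLatex headers cand sheet_name
      if (((block.length : Int) > max_chars) ∧ st.2 ≠ []) then
        (st.1 ++ [String.ofList (pvRowsToLatex headers st.2 sheet_name)], [row])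
      else
        (st.1, st.2 ++ [row])) ([], [])
    if st.2 ≠ [] then st.1 ++ [String.ofList (pvRowsToLatex headers st.2 sheet_name)] else st.1

-- ===== PORT B =====

-- the fixed lines above the data rows
def pvPre (headers : List String) (sheet_name : Option String) : List (List Char) :=
  (match sheet_name with
    | some s => if s = "" then [] else ["% Sheet: ".toList ++ s.toList]
    | none => []) ++
  ["\\begin{tabular}{".toList ++ List.replicate headers.length 'l' ++ "}".toList,
   "\\hline".toList,
   PySem.Chars.join " & ".toList (headers.map (fun h => pvEsc h.toList)) ++ " \\\\".toList,
   "\\hline".toList]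

-- the fixed lines below the data rows
def pvSuf : List (List Char) := ["\\hline".toList, "\\end{tabular}".toList]

def split_rows_to_sections_py_alt (headers : List String) (rows : List (List String)) (sheet_name : Option String) (max_chars : Int) : List String :=
  if headers = [] then []
  else
    let pre := pvPre headers sheet_name
    let suf := pvSuf
    let rowLines := rows.map (pvRowLine headers.length)
    let base : Int := ((pre ++ suf).map (fun l => (l.length : Int) + 1)).sum - 1
    let total : Int := base + (rowLines.map (fun l => (l.length : Int) + 1)).sum
    if (total ≤ max_chars ∨ rows.length ≤ 1) then
      [String.ofList (PySem.Chars.join ['\n'] (pre ++ rowLines ++ suf))]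
    else
      let st := rowLines.foldl
        (fun (st : List (List (List Char)) × List (List Char) × Int) line =>
          let c : Int := (line.length : Int) + 1
          if ((base + st.2.2 + c > max_chars) ∧ st.2.1 ≠ []) then
            (st.1 ++ [st.2.1], [line], c)
          else
            (st.1, st.2.1 ++ [line], st.2.2 + c)) ([], [], 0)
      (st.1 ++ [st.2.1]).map
        (fun g => String.ofList (PySem.Chars.join ['\n'] (pre ++ g ++ suf)))

-- ===== PRECONDITION & SPEC =====
-- When headers is empty, max_chars negative and there are at least two rows, A returns one empty
-- string per row (empty sections of an entirely empty table), while B returns [], the intended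
-- 'no sections for an empty table' answer A itself gives everywhere else headers is empty.
def D_split_rows_to_sections_py (headers : List String) (rows : List (List String)) (sheet_name : Option String) (max_chars : Int) : Prop :=
  headers = [] ∧ 2 ≤ rows.length ∧ max_chars < 0
instance (headers : List String) (rows : List (List String)) (sheet_name : Option String) (max_chars : Int) : Decidable (D_split_rows_to_sections_py headers rows sheet_name max_chars) := by unfold D_split_rows_to_sections_py; infer_instance

def Spec_split_rows_to_sections_py (headers : List String) (rows : List (List String)) (sheet_name : Option String) (max_chars : Int) (out : List String) : Prop := ¬ D_split_rows_to_sections_py headers rows sheet_name max_chars → out = split_rows_to_sections_py_alt headers rows sheet_name max_chars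
instance (headers : List String) (rows : List (List String)) (sheet_name : Option String) (max_chars : Int) (out : List String) : Decidable (Spec_split_rows_to_sections_py headers rows sheet_name max_chars out) := by unfold Spec_split_rows_to_sections_py; infer_instance

def pvDiffWitness_split_rows_to_sections_py : List String × List (List String) × Option String × Int :=
  ([], [[], []], none, -1)
def pvDiffWitnessOut_split_rows_to_sections_py : (List String) × (List String) := (["", ""], [])

-- ===== CLAIM (what is proved, stated in full; the proofs are below) =====
def Claim_unchanged_split_rows_to_sections_py : Prop := ∀ (headers : List String) (rows : List (List String)) (sheet_name : Option String) (max_chars : Int), Dom_split_rows_to_sections_py headers rows sheet_name max_chars → Spec_split_rows_to_sections_py headers rows sheet_name max_chars (split_rows_to_sections_py headers rows sheet_name max_chars)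
def Claim_changed_split_rows_to_sections_py : Prop := Dom_split_rows_to_sections_py (pvDiffWitness_split_rows_to_sections_py.1) (pvDiffWitness_split_rows_to_sections_py.2.1) (pvDiffWitness_split_rows_to_sections_py.2.2.1) (pvDiffWitness_split_rows_to_sections_py.2.2.2) ∧ D_split_rows_to_sections_py (pvDiffWitness_split_rows_to_sections_py.1) (pvDiffWitness_split_rows_to_sections_py.2.1) (pvDiffWitness_split_rows_to_sections_py.2.2.1) (pvDiffWitness_split_rows_to_sections_py.2.2.2) ∧ split_rows_to_sections_py (pvDiffWitness_split_rows_to_sections_py.1) (pvDiffWitness_split_rows_to_sections_py.2.1) (pvDiffWitness_split_rows_to_sections_py.2.2.1) (pvDiffWitness_split_rows_to_sections_py.2.2.2) = pvDiffWitnessOut_split_rows_to_sections_py.1 ∧ split_rows_to_sections_py_alt (pvDiffWitness_split_rows_to_sections_py.1) (pvDiffWitness_split_rows_to_sections_py.2.1) (pvDiffWitness_split_rows_to_sections_py.2.2.1) (pvDiffWitness_split_rows_to_sections_py.2.2.2) = pvDiffWitnessOut_split_rows_to_sections_py.2 ∧ pvDiffWitnessOut_split_rows_to_sections_py.1 ≠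 pvDiffWitnessOut_split_rows_to_sections_py.2
def Claim_exact_split_rows_to_sections_py : Prop := ∀ (headers : List String) (rows : List (List String)) (sheet_name : Option String) (max_chars : Int), Dom_split_rows_to_sections_py headers rows sheet_name max_chars → D_split_rows_to_sections_py headers rows sheet_name max_chars → split_rows_to_sections_py headers rows sheet_name max_chars ≠ split_rows_to_sections_py_alt headers rows sheet_name max_chars

-- ===== LEMMAS AND PROOFS =====

-- cost of one rendered row line inside a joined block: its length plus the newline
def pvCost (l : List Char) : Int := (l.length : Int) + 1

-- the length a block contributes before/after its data rows
def pvBase (headers : List String) (sheet_name : Option String) : Int :=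
  (((pvPre headers sheet_name ++ pvSuf).map pvCost).sum) - 1

theorem pv_intercalate_cons_cons (sep a b : List Char) (l : List (List Char)) :
    sep.intercalate (a :: b :: l) = a ++ sep ++ sep.intercalate (b :: l) := by
  simp [List.intercalate, List.intersperse]

theorem pv_len_join : ∀ (ls : List (List Char)), ls ≠ [] →
    ((PySem.Chars.join ['\n'] ls).length : Int) = (ls.map pvCost).sum - 1 := by
  intro ls
  induction ls with
  | nil => intro h; exact absurd rfl h
  | cons a t ih =>
    intro _
    cases t with
    | nil => simp [PySem.Chars.join, List.intercalate, pvCost]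
    | cons b t' =>
      simp only [PySem.Chars.join] at ih ⊢
      rw [pv_intercalate_cons_cons]
      have := ih (by simp)
      simp only [List.map_cons, List.sum_cons, List.length_append] at this ⊢
      push_cast
      simp [pvCost] at this ⊢
      omega

theorem pv_latex_eq (headers : List String) (rows : List (List String)) (sheet_name : Option String)
    (hh : headers ≠ []) :
    pvRowsToLatex headers rows sheet_name =
      PySem.Chars.join ['\n'] (pvPre headers sheet_name ++ rows.map (pvRowLine headers.length) ++ pvSuf) := by
  simp [pvRowsToLatex, pvPre, pvSuf, hh, List.append_assoc]

theorem pv_len_latex (headers : List String) (rows : List (List String)) (sheet_name : Option String)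
    (hh : headers ≠ []) :
    ((pvRowsToLatex headers rows sheet_name).length : Int) =
      pvBase headers sheet_name + ((rows.map (pvRowLine headers.length)).map pvCost).sum := by
  rw [pv_latex_eq _ _ _ hh, pv_len_join _ (by simp [pvSuf]), pvBase]
  simp [List.sum_append]
  ring

theorem pv_mem_join (sep : List Char) : ∀ (ls : List (List Char)) (x : List Char),
    x ∈ ls → ∀ c ∈ x, c ∈ PySem.Chars.join sep ls := by
  intro ls
  induction ls with
  | nil => intro x hx; simp at hx
  | cons a t ih =>
    intro x hx c hc
    cases t with
    | nil =>
      simp at hx; subst hx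
      simpa [PySem.Chars.join, List.intercalate] using hc
    | cons b t' =>
      simp only [PySem.Chars.join] at ih ⊢
      rw [pv_intercalate_cons_cons]
      rcases List.mem_cons.mp hx with h | h
      · subst h; simp [hc]
      · simp [ih x h c hc]

theorem pv_strip_ne_nil {cs : List Char} {c : Char} (hm : c ∈ cs)
    (hc : PySem.Chars.isspace c = false) : PySem.Chars.strip cs ≠ [] := by
  intro hnil
  have hall : ∀ x ∈ cs, PySem.Chars.isspace x = true := by
    have h1 : PySem.Chars.rstrip (PySem.Chars.lstrip cs) = [] := hnil
    have h2 : ∀ x ∈ PySem.Chars.lstrip cs, PySem.Chars.isspace x = true := by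
      intro x hx
      have : (PySem.Chars.lstrip cs).reverse.dropWhile PySem.Chars.isspace = [] := by
        have := congrArg List.reverse h1
        simpa [PySem.Chars.rstrip] using this
      exact List.dropWhile_eq_nil_iff.mp this x (by simpa using hx)
    intro x hx
    have hsplit := List.takeWhile_append_dropWhile (p := PySem.Chars.isspace) (l := cs)
    rw [← hsplit] at hx
    rcases List.mem_append.mp hx with h | h
    · exact List.mem_takeWhile_imp h
    · exact h2 x h
  rw [hall c hm] at hc
  exact absurd hc (by simp)

theorem pv_strip_latex_ne_nil (headers : List String) (rows : List (List String))
    (sheet_name : Option String) (hh : headers ≠ []) :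
    PySem.Chars.strip (pvRowsToLatex headers rows sheet_name) ≠ [] := by
  apply pv_strip_ne_nil (c := '\\')
  · rw [pv_latex_eq _ _ _ hh]
    apply pv_mem_join _ _ ("\\end{tabular}".toList)
    · simp [pvSuf]
    · decide
  · decide

-- A's loop and B's loop stay in lock-step: A's current row group, rendered, is B's
-- current line group, and B's running length is A's candidate-block length minus base
theorem pv_loop_eq (headers : List String) (sheet_name : Option String) (max_chars : Int)
    (hh : headers ≠ []) :
    ∀ (rs : List (List String)) (secs : List String) (groups : List (List (List Char)))
      (current : List (List String)),
      current ≠ [] →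
      secs = groups.map (fun g => String.ofList
        (PySem.Chars.join ['\n'] (pvPre headers sheet_name ++ g ++ pvSuf))) →
      (let st := rs.foldl (fun (st : List String × List (List String)) row =>
          let cand := st.2 ++ [row]
          let block := pvRowsToLatex headers cand sheet_name
          if (((block.length : Int) > max_chars) ∧ st.2 ≠ []) then
            (st.1 ++ [String.ofList (pvRowsToLatex headers st.2 sheet_name)], [row])
          else
            (st.1, st.2 ++ [row])) (secs, current)
        if st.2 ≠ [] then st.1 ++ [String.ofList (pvRowsToLatex headers st.2 sheet_name)] else st.1)
      = (let st := (rs.map (pvRowLine headers.length)).foldl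
          (fun (st : List (List (List Char)) × List (List Char) × Int) line =>
            let c : Int := (line.length : Int) + 1
            if ((pvBase headers sheet_name + st.2.2 + c > max_chars) ∧ st.2.1 ≠ []) then
              (st.1 ++ [st.2.1], [line], c)
            else
              (st.1, st.2.1 ++ [line], st.2.2 + c))
          (groups, current.map (pvRowLine headers.length),
            ((current.map (pvRowLine headers.length)).map pvCost).sum)
        (st.1 ++ [st.2.1]).map (fun g => String.ofList
          (PySem.Chars.join ['\n'] (pvPre headers sheet_name ++ g ++ pvSuf)))) := by
  intro rs
  induction rs with
  | nil =>
    intro secs groups current hcur hsecs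
    simp only [List.foldl_nil, List.map_nil]
    rw [if_pos hcur, hsecs]
    simp [pv_latex_eq _ _ _ hh]
  | cons r rest ih =>
    intro secs groups current hcur hsecs
    simp only [List.foldl_cons, List.map_cons]
    have hcond : (((pvRowsToLatex headers (current ++ [r]) sheet_name).length : Int) > max_chars ∧ current ≠ [])
        ↔ (pvBase headers sheet_name + ((current.map (pvRowLine headers.length)).map pvCost).sum
            + ((pvRowLine headers.length r).length + 1) > max_chars
           ∧ current.map (pvRowLine headers.length) ≠ []) := by
      rw [pv_len_latex _ _ _ hh]
      constructor
      · rintro ⟨h1, h2⟩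
        refine ⟨?_, by simpa using h2⟩
        simp only [List.map_append, List.map_cons, List.map_nil, List.sum_append,
          List.sum_cons, List.sum_nil, pvCost] at h1 ⊢
        omega
      · rintro ⟨h1, h2⟩
        refine ⟨?_, by simpa using h2⟩
        simp only [List.map_append, List.map_cons, List.map_nil, List.sum_append,
          List.sum_cons, List.sum_nil, pvCost] at h1 ⊢
        omega
    by_cases hc : (((pvRowsToLatex headers (current ++ [r]) sheet_name).length : Int) > max_chars ∧ current ≠ [])
    · rw [if_pos hc, if_pos (hcond.mp hc)]
      rw [ih (secs ++ [String.ofList (pvRowsToLatex headers current sheet_name)])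
          (groups ++ [current.map (pvRowLine headers.length)]) [r] (by simp)
          (by simp [hsecs, pv_latex_eq _ _ _ hh])]
      simp [pvCost]
    · rw [if_neg hc, if_neg (fun h => hc (hcond.mpr h))]
      rw [ih secs groups (current ++ [r]) (by simp) hsecs]
      simp [pvCost]

-- A's loop on empty headers appends one empty section per remaining row
theorem pv_empty_loop (headers : List String) (sheet_name : Option String) (max_chars : Int)
    (hh : headers = []) (hneg : max_chars < 0) :
    ∀ (rs : List (List String)) (secs : List String) (current : List (List String)),
      current ≠ [] →
      (let st := rs.foldl (fun (st : List String × List (List String)) row =>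
          let cand := st.2 ++ [row]
          let block := pvRowsToLatex headers cand sheet_name
          if (((block.length : Int) > max_chars) ∧ st.2 ≠ []) then
            (st.1 ++ [String.ofList (pvRowsToLatex headers st.2 sheet_name)], [row])
          else
            (st.1, st.2 ++ [row])) (secs, current)
        if st.2 ≠ [] then st.1 ++ [String.ofList (pvRowsToLatex headers st.2 sheet_name)] else st.1)
      = secs ++ List.replicate rs.length "" ++ [""] := by
  subst hh
  have h0 : String.ofList ([] : List Char) = "" := by decide
  have hL : ∀ (rs : List (List String)), pvRowsToLatex [] rs sheet_name = [] := by
    intro rs; simp [pvRowsToLatex]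
  intro rs
  induction rs with
  | nil =>
    intro secs current hcur
    simp only [List.foldl_nil]
    rw [if_pos hcur]
    simp [hL, h0]
  | cons r rest ih =>
    intro secs current hcur
    simp only [List.foldl_cons]
    have hc : ((pvRowsToLatex [] (current ++ [r]) sheet_name).length : Int) > max_chars ∧
        current ≠ [] := ⟨by rw [hL]; simpa using hneg, hcur⟩
    rw [if_pos hc]
    rw [ih (secs ++ [String.ofList (pvRowsToLatex [] current sheet_name)]) [r] (by simp)]
    simp [hL, h0, List.replicate_succ]

-- A's value inside D_: one empty string per row
theorem pv_A_empty (rows : List (List String)) (sheet_name : Option String) (max_chars : Int)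
    (hlen : 2 ≤ rows.length) (hneg : max_chars < 0) :
    split_rows_to_sections_py [] rows sheet_name max_chars = List.replicate rows.length "" := by
  have hL : ∀ rs, pvRowsToLatex [] rs sheet_name = [] := by intro rs; simp [pvRowsToLatex]
  simp only [split_rows_to_sections_py]
  rw [if_neg (by rw [hL]; push_neg; exact ⟨by simpa using hneg, by omega⟩)]
  cases rows with
  | nil => simp at hlen
  | cons r rest =>
    have hc1 : ¬(((pvRowsToLatex [] ([] ++ [r]) sheet_name).length : Int) > max_chars ∧
        ([] : List (List String)) ≠ []) := by simp
    simp only [List.foldl_cons]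
    rw [if_neg hc1]
    have hE := pv_empty_loop [] sheet_name max_chars rfl hneg rest [] ([] ++ [r]) (by simp)
    simp only [] at hE
    rw [hE]
    simp only [List.nil_append, List.length_cons]
    rw [← List.replicate_succ', List.replicate_succ]

-- ===== VERDICT (by name: the statement is the Claim_ definition above) =====
theorem split_rows_to_sections_py_spec : Claim_unchanged_split_rows_to_sections_py := by
  intro headers rows sheet_name max_chars _hdom
  unfold Spec_split_rows_to_sections_py
  intro hnD
  by_cases hh : headers = []
  · subst hh
    have hok : (0 : Int) ≤ max_chars ∨ rows.length ≤ 1 := by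
      unfold D_split_rows_to_sections_py at hnD
      by_contra hcon
      push_neg at hcon
      exact hnD ⟨rfl, by omega, by omega⟩
    simp only [split_rows_to_sections_py, split_rows_to_sections_py_alt]
    have hL : pvRowsToLatex [] rows sheet_name = [] := by simp [pvRowsToLatex]
    rw [if_pos trivial]
    rw [if_pos (by rw [hL]; simpa using hok)]
    rw [if_neg (by simp [hL, PySem.Chars.strip, PySem.Chars.lstrip, PySem.Chars.rstrip])]
  · simp only [split_rows_to_sections_py, split_rows_to_sections_py_alt]
    rw [if_neg hh]
    have htot : ((pvRowsToLatex headers rows sheet_name).length : Int) =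
        ((((pvPre headers sheet_name ++ pvSuf).map (fun l => ((l.length : Int) + 1))).sum - 1) +
          ((rows.map (pvRowLine headers.length)).map (fun l => ((l.length : Int) + 1))).sum) := by
      rw [pv_len_latex _ _ _ hh]; rfl
    by_cases hg : (((pvRowsToLatex headers rows sheet_name).length : Int) ≤ max_chars ∨ rows.length ≤ 1)
    · have hgB : (((((pvPre headers sheet_name ++ pvSuf).map (fun l => ((l.length : Int) + 1))).sum - 1) +
          ((rows.map (pvRowLine headers.length)).map (fun l => ((l.length : Int) + 1))).sum ≤ max_chars) ∨
          rows.length ≤ 1) := by rw [← htot]; exact hg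
      rw [if_pos hg, if_pos (pv_strip_latex_ne_nil _ _ _ hh), if_pos hgB]
      rw [pv_latex_eq _ _ _ hh]
    · have hgB : ¬(((((pvPre headers sheet_name ++ pvSuf).map (fun l => ((l.length : Int) + 1))).sum - 1) +
          ((rows.map (pvRowLine headers.length)).map (fun l => ((l.length : Int) + 1))).sum ≤ max_chars) ∨
          rows.length ≤ 1) := by rw [← htot]; exact hg
      rw [if_neg hg, if_neg hgB]
      push_neg at hg
      obtain ⟨hbig, hlen2⟩ := hg
      cases rows with
      | nil => simp at hlen2
      | cons r rest =>
        have hcA : ¬(((pvRowsToLatex headers ([] ++ [r]) sheet_name).length : Int) > max_chars ∧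
            ([] : List (List String)) ≠ []) := by simp
        have hcB : ¬((((pvPre headers sheet_name ++ pvSuf).map (fun l => ((l.length : Int) + 1))).sum - 1
              + (0 : Int) + (((pvRowLine headers.length r).length : Int) + 1) > max_chars) ∧
            ([] : List (List Char)) ≠ []) := by simp
        simp only [List.foldl_cons, List.map_cons]
        rw [if_neg hcA, if_neg hcB]
        have hE := pv_loop_eq headers sheet_name max_chars hh rest [] [] ([] ++ [r])
          (by simp) (by simp)
        simp only [List.nil_append, List.map_cons, List.map_nil, List.sum_cons,
          List.sum_nil, pvCost, pvBase, add_zero, zero_add] at hE ⊢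
        exact hE

theorem split_rows_to_sections_py_changed : Claim_changed_split_rows_to_sections_py := by
  unfold Claim_changed_split_rows_to_sections_py; decide

theorem split_rows_to_sections_py_tight : Claim_exact_split_rows_to_sections_py := by
  intro headers rows sheet_name max_chars _hdom hD
  obtain ⟨hh, hlen, hneg⟩ := hD
  subst hh
  rw [pv_A_empty rows sheet_name max_chars hlen hneg]
  have hB : split_rows_to_sections_py_alt [] rows sheet_name max_chars = [] := by
    simp [split_rows_to_sections_py_alt]
  rw [hB]
  intro h
  rw [List.replicate_eq_nil_iff] at h
  omega
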